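-- pv_equiv track=rewrite | github.com/marizzxxxx/N1-LISTA3-PEED | q8.py | decprahex
-- ===== SOURCE A (Python) =====
-- class Pilha:
--     def __init__(self):
--         self.items = []
--
--     def vazia(self):
--         return len(self.items) == 0
--
--     def empilhar(self, item):
--         self.items.append(item)
--
--     def desempilhar(self):
--         if not self.vazia():
--             return self.items.pop()
--         else:
--             return None
--
--     def topo(self):
--         if not self.vazia():
--             return self.items[-1]
--         else:
--             return None
--
--     def tamanho(self):
--         return len(self.items)
--
-- def decprahex(dec):
--     pilha = Pilha()
--     nums = "0123456789ABCDEF"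
--
--     while dec > 0:
--         resto = dec % 16
--         pilha.empilhar(resto)
--         dec = dec // 16
--
--     hexa = ""
--     while not pilha.vazia():
--         digito = pilha.desempilhar()
--         hexa += nums[digito]
--
--     return hexa
-- ===== SOURCE B (Python) =====
-- def decprahex(dec):
--     nums = "0123456789ABCDEF"
--     if dec > 0:
--         return decprahex(dec // 16) + nums[dec % 16]
--     return ""
-- ===== Notes on version B (the rewrite author's own statement) =====
-- stated objective: simpler
-- what changed: Replaces the explicit Pilha stack (one loop pushing remainders, a second loop popping and concatenating) with direct recursion on the quotient that threads the digit order through the call stack; no stack class at all.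
import Mathlib
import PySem

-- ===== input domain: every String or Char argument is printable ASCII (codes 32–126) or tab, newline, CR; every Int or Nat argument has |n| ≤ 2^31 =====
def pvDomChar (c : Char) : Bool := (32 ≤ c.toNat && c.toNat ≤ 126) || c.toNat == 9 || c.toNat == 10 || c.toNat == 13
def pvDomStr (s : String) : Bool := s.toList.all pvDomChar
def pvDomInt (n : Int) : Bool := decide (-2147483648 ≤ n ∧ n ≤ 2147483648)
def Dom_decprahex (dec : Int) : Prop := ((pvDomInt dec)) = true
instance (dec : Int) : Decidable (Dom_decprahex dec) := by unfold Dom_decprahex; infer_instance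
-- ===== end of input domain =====

-- B replaces A's explicit Pilha stack (push-remainders loop + pop-and-concatenate loop)
-- with direct recursion on dec // 16; same value, simpler decomposition.


-- ===== PORT A =====
-- nums = "0123456789ABCDEF"; nums[digito] — indexing via PySem.Str.pyGet?;
-- getD ' ' is never taken: the pushed digits are dec % 16 ∈ [0,16).
def pvCharOf (d : Int) : String :=
  String.singleton ((PySem.Str.pyGet? "0123456789ABCDEF" d).getD ' ')

-- first while-loop of A: while dec > 0: pilha.empilhar(dec % 16); dec = dec // 16
-- (Pilha.items with the stack top at the end of the list)
def pvPushLoop (dec : Int) (items : List Int) : List Int :=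
  if dec > 0 then
    pvPushLoop (PySem.Int.floordiv dec 16) (items ++ [PySem.Int.mod dec 16])
  else items
termination_by dec.toNat
decreasing_by
  rename_i h
  rw [PySem.Int.floordiv_eq_ediv_of_pos (by omega)]
  omega

-- second while-loop of A: while not pilha.vazia(): hexa += nums[pilha.desempilhar()]
def pvPopLoop : List Int → String → String
  | [], hexa => hexa
  | x :: xs, hexa =>
      pvPopLoop ((x :: xs).dropLast) (hexa ++ pvCharOf ((x :: xs).getLastD 0))
termination_by items _ => items.length
decreasing_by simp

def decprahex (dec : Int) : String :=
  pvPopLoop (pvPushLoop dec []) ""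

-- ===== PORT B =====
def decprahex_alt (dec : Int) : String :=
  if dec > 0 then
    decprahex_alt (PySem.Int.floordiv dec 16) ++
      String.singleton ((PySem.Str.pyGet? "0123456789ABCDEF" (PySem.Int.mod dec 16)).getD ' ')
  else ""
termination_by dec.toNat
decreasing_by
  rename_i h
  rw [PySem.Int.floordiv_eq_ediv_of_pos (by omega)]
  omega

-- ===== PRECONDITION & SPEC =====
def Spec_decprahex (dec : Int) (out : String) : Prop := out = decprahex_alt dec
instance (dec : Int) (out : String) : Decidable (Spec_decprahex dec out) := by unfold Spec_decprahex; infer_instance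

-- ===== CLAIM (what is proved, stated in full; the proofs are below) =====
def Claim_equal_decprahex : Prop := ∀ (dec : Int), Dom_decprahex dec → Spec_decprahex dec (decprahex dec)

-- ===== LEMMAS AND PROOFS =====

-- popping a stack whose top (list end) is y: one step of the pop loop
theorem pvPopLoop_concat (xs : List Int) (y : Int) (h : String) :
    pvPopLoop (xs ++ [y]) h = pvPopLoop xs (h ++ pvCharOf y) := by
  cases xs with
  | nil => simp [pvPopLoop]
  | cons z zs =>
      rw [List.cons_append, pvPopLoop]
      have h1 : (z :: (zs ++ [y])).dropLast = z :: zs := by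
        rw [← List.cons_append (a := z) (as := zs) (bs := [y]), List.dropLast_concat]
      have h2 : (z :: (zs ++ [y])).getLastD 0 = y := by
        rw [← List.cons_append (a := z) (as := zs) (bs := [y]), List.getLastD_concat]
      rw [h1, h2]

-- the already-emitted prefix factors out of the pop loop
theorem pvPopLoop_prefix (xs : List Int) (h : String) :
    pvPopLoop xs h = h ++ pvPopLoop xs "" := by
  induction xs using List.reverseRecOn generalizing h with
  | nil => simp [pvPopLoop]
  | append_singleton ys y ih =>
      rw [pvPopLoop_concat, pvPopLoop_concat, ih (h ++ pvCharOf y), ih ("" ++ pvCharOf y)]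
      simp [String.append_assoc]

theorem pvB_unfold (dec : Int) (hd : dec > 0) :
    decprahex_alt dec =
      decprahex_alt (PySem.Int.floordiv dec 16) ++ pvCharOf (PySem.Int.mod dec 16) := by
  rw [decprahex_alt, if_pos hd, pvCharOf]

-- main invariant: popping the stack built from dec on top of acc emits h, then
-- B's digits of dec, then the pops of acc
theorem pvMain : ∀ n (dec : Int), dec.toNat = n → ∀ (acc : List Int) (h : String),
    pvPopLoop (pvPushLoop dec acc) h = h ++ decprahex_alt dec ++ pvPopLoop acc "" := by
  intro n
  induction n using Nat.strong_induction_on with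
  | _ n ih =>
    intro dec hn acc h
    by_cases hd : dec > 0
    · rw [pvPushLoop, if_pos hd]
      have hlt : (PySem.Int.floordiv dec 16).toNat < n := by
        rw [PySem.Int.floordiv_eq_ediv_of_pos (by omega : (0:Int) < 16)]
        omega
      rw [ih _ hlt _ rfl]
      rw [pvPopLoop_concat, pvPopLoop_prefix, pvB_unfold dec hd]
      simp [String.append_assoc]
    · rw [pvPushLoop, if_neg hd, decprahex_alt, if_neg hd, pvPopLoop_prefix]
      simp

-- ===== VERDICT (by name: the statement is the Claim_ definition above) =====
theorem decprahex_spec : Claim_equal_decprahex := by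
  intro dec _
  unfold Spec_decprahex decprahex
  rw [pvMain dec.toNat dec rfl [] ""]
  simp [pvPopLoop]
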